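-- pv_equiv track=rewrite | github.com/Snazzythat/ECSE420_Lab2 | grid_4_4.py | get_node_num
-- ===== SOURCE A (Python) =====
-- GRID_SIZE = 4
--
-- def get_node_num(coord_tuple):
--     #eliminate the boundary conditions first
--     num = 0
--
--     if(coord_tuple[0] < 0 or coord_tuple[1]  < 0):
--         num = -1
--     elif(coord_tuple[0] >= GRID_SIZE or coord_tuple[0] >= GRID_SIZE):
--         num = -1
--     else:
--         rank_counter = -1
--         for j in range(0, GRID_SIZE):
--             for i in range(0, GRID_SIZE):
--                 rank_counter += 1
--                 if(coord_tuple[0]==i and coord_tuple[1]==j):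
--                     num = rank_counter
--     return num
-- ===== SOURCE B (Python) =====
-- GRID_SIZE = 4
--
-- def get_node_num(coord_tuple):
--     x, y = coord_tuple
--     if 0 <= x < GRID_SIZE and 0 <= y < GRID_SIZE:
--         return y * GRID_SIZE + x
--     return -1
-- ===== Notes on version B (the rewrite author's own statement) =====
-- stated objective: simpler
-- what changed: Replaces the 16-iteration double scan (with a running rank counter) by a single bounds check plus the closed-form index y*GRID_SIZE+x.
-- intended difference: For coordinates with 0 <= x < 4 and y >= 4 A's column guard (it tests coord[0] twice and never coord[1]) misses the out-of-range row and returns the leftover default 0, a valid node index; B returns -1, the intended out-of-bounds marker this function uses for every other out-of-range input. — e.g. on get_node_num(2, 5): A returns 0, B returns -1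
import Mathlib
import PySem

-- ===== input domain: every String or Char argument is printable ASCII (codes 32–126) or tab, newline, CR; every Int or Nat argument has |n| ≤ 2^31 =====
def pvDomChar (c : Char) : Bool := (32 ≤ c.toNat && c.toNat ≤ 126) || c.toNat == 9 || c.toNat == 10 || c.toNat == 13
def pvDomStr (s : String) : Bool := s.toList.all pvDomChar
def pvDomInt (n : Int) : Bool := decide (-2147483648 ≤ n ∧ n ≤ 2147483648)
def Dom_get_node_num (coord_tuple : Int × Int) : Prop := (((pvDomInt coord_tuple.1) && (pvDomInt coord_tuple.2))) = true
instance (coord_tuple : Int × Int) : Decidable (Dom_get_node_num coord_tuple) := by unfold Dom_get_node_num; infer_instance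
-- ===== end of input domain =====

-- B replaces A's double scan by a closed-form bounds check + index formula (simpler);
-- it intentionally returns -1 (not A's leftover 0) when the row coordinate is out of range (see D_ below).

-- ===== PORT A =====
def pvGRID_SIZE : Int := 4

def get_node_num (coord_tuple : Int × Int) : Int :=
  let num : Int := 0
  if coord_tuple.1 < 0 ∨ coord_tuple.2 < 0 then
    -1
  else if coord_tuple.1 ≥ pvGRID_SIZE ∨ coord_tuple.1 ≥ pvGRID_SIZE then
    -1
  else
    -- rank_counter = -1; nested for-loops over range(0, GRID_SIZE); state = (rank_counter, num)
    let st := (PySem.List.pyRange 0 pvGRID_SIZE 1).foldl (fun st j =>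
      (PySem.List.pyRange 0 pvGRID_SIZE 1).foldl (fun st i =>
        let rank_counter := st.1 + 1
        let num := if coord_tuple.1 = i ∧ coord_tuple.2 = j then rank_counter else st.2
        (rank_counter, num)) st) ((-1 : Int), num)
    st.2

-- ===== PORT B =====
def get_node_num_alt (coord_tuple : Int × Int) : Int :=
  let x := coord_tuple.1
  let y := coord_tuple.2
  if 0 ≤ x ∧ x < pvGRID_SIZE ∧ 0 ≤ y ∧ y < pvGRID_SIZE then
    y * pvGRID_SIZE + x
  else
    -1

-- ===== PRECONDITION & SPEC =====
-- For inputs with 0 ≤ x < 4 and y ≥ 4, A's guard tests coord[0] twice and never coord[1], so the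
-- loop matches nothing and A returns the leftover default 0 (a valid node index); B returns -1,
-- the intended out-of-bounds marker used for every other out-of-range input.
def D_get_node_num (coord_tuple : Int × Int) : Prop :=
  0 ≤ coord_tuple.1 ∧ coord_tuple.1 < 4 ∧ 4 ≤ coord_tuple.2
instance (coord_tuple : Int × Int) : Decidable (D_get_node_num coord_tuple) := by
  unfold D_get_node_num; infer_instance

def Spec_get_node_num (coord_tuple : Int × Int) (out : Int) : Prop :=
  ¬ D_get_node_num coord_tuple → out = get_node_num_alt coord_tuple
instance (coord_tuple : Int × Int) (out : Int) : Decidable (Spec_get_node_num coord_tuple out) := by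
  unfold Spec_get_node_num; infer_instance

def pvDiffWitness_get_node_num : (Int × Int) := (2, 5)
def pvDiffWitnessOut_get_node_num : Int × Int := (0, -1)

-- ===== CLAIM (what is proved, stated in full; the proofs are below) =====
def Claim_unchanged_get_node_num : Prop := ∀ (coord_tuple : Int × Int), Dom_get_node_num coord_tuple → Spec_get_node_num coord_tuple (get_node_num coord_tuple)
def Claim_changed_get_node_num : Prop := Dom_get_node_num (pvDiffWitness_get_node_num) ∧ D_get_node_num (pvDiffWitness_get_node_num) ∧ get_node_num (pvDiffWitness_get_node_num) = pvDiffWitnessOut_get_node_num.1 ∧ get_node_num_alt (pvDiffWitness_get_node_num) = pvDiffWitnessOut_get_node_num.2 ∧ pvDiffWitnessOut_get_node_num.1 ≠ pvDiffWitnessOut_get_node_num.2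
def Claim_exact_get_node_num : Prop := ∀ (coord_tuple : Int × Int), Dom_get_node_num coord_tuple → D_get_node_num coord_tuple → get_node_num coord_tuple ≠ get_node_num_alt coord_tuple

-- ===== LEMMAS AND PROOFS =====

lemma pv_range4 : PySem.List.pyRange 0 4 = [0, 1, 2, 3] := by decide

-- Inside D_, A's loop never matches (y ≥ 4 differs from every j ∈ {0,1,2,3}), so A returns 0.
lemma pv_A_zero (x y : Int) (hx0 : 0 ≤ x) (hx4 : x < 4) (hy : 4 ≤ y) :
    get_node_num (x, y) = 0 := by
  have h0 : y ≠ 0 := by omega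
  have h1 : y ≠ 1 := by omega
  have h2 : y ≠ 2 := by omega
  have h3 : y ≠ 3 := by omega
  simp [get_node_num, pvGRID_SIZE, pv_range4, List.foldl, h0, h1, h2, h3]
  rw [if_neg (by omega), if_neg (by omega)]

-- ===== VERDICT (by name: the statement is the Claim_ definition above) =====
theorem get_node_num_spec : Claim_unchanged_get_node_num := by
  intro c _ hD
  obtain ⟨x, y⟩ := c
  unfold D_get_node_num at hD
  simp only at hD
  by_cases hx0 : x < 0
  · simp [get_node_num, get_node_num_alt, pvGRID_SIZE, hx0]
  · by_cases hy0 : y < 0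
    · simp [get_node_num, get_node_num_alt, pvGRID_SIZE, hy0]
    · by_cases hx4 : x ≥ 4
      · have : ¬ (0 ≤ x ∧ x < 4 ∧ 0 ≤ y ∧ y < 4) := by omega
        simp [get_node_num, get_node_num_alt, pvGRID_SIZE, hx0, hy0, hx4]
      · -- in range: 0 ≤ x < 4 and (from ¬D_) 0 ≤ y < 4
        have hy4 : y < 4 := by omega
        interval_cases x <;> interval_cases y <;> decide

theorem get_node_num_changed : Claim_changed_get_node_num := by
  unfold Claim_changed_get_node_num; decide

theorem get_node_num_tight : Claim_exact_get_node_num := by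
  intro c _ hD
  obtain ⟨x, y⟩ := c
  obtain ⟨hx0, hx4, hy⟩ := hD
  simp only at hx0 hx4 hy
  rw [pv_A_zero x y hx0 hx4 hy]
  have : ¬ (0 ≤ x ∧ x < pvGRID_SIZE ∧ 0 ≤ y ∧ y < pvGRID_SIZE) := by
    unfold pvGRID_SIZE; omega
  simp [get_node_num_alt, this]
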